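-- pv_equiv track=rewrite | github.com/warHanz/analisisSentimen | utils/analysis_utils.py | label_sentiment
-- ===== SOURCE A (Python) =====
-- def label_sentiment(text, positive_words, negative_words):
--     """
--     Memberikan label sentimen berdasarkan teks (string, bukan list token).
--     """
--     tokens = text.split()  # Asumsi teks sudah dalam bentuk string
--     positive_count = sum(1 for token in tokens if token in positive_words)
--     negative_count = sum(1 for token in tokens if token in negative_words)
--     sentiment_score = positive_count - negative_count
--
--     if sentiment_score > 0:
--         sentiment = "Positive"
--     elif sentiment_score < 0:
--         sentiment = "Negative"
--     else:
--         sentiment = "Neutral"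
--
--     return sentiment_score, sentiment
-- ===== SOURCE B (Python) =====
-- def label_sentiment(text, positive_words, negative_words):
--     # Build a frequency table of the tokens once, then test membership only
--     # once per DISTINCT word, weighting it by its occurrence count.
--     counts = {}
--     for token in text.split():
--         counts[token] = counts.get(token, 0) + 1
--     sentiment_score = 0
--     for word, cnt in counts.items():
--         if word in positive_words:
--             sentiment_score += cnt
--         if word in negative_words:
--             sentiment_score -= cnt
--     if sentiment_score > 0:
--         sentiment = "Positive"
--     elif sentiment_score < 0:
--         sentiment = "Negative"
--     else:
--         sentiment = "Neutral"
--     return sentiment_score, sentiment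
-- ===== Notes on version B (the rewrite author's own statement) =====
-- stated objective: alternative
-- what changed: Instead of scanning the full token list against the word lists twice, B first aggregates the tokens into a frequency dictionary and then does one membership test per DISTINCT word, adding/subtracting its occurrence count; correct because the score is count-weighted-linear in the distinct words.
import Mathlib
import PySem

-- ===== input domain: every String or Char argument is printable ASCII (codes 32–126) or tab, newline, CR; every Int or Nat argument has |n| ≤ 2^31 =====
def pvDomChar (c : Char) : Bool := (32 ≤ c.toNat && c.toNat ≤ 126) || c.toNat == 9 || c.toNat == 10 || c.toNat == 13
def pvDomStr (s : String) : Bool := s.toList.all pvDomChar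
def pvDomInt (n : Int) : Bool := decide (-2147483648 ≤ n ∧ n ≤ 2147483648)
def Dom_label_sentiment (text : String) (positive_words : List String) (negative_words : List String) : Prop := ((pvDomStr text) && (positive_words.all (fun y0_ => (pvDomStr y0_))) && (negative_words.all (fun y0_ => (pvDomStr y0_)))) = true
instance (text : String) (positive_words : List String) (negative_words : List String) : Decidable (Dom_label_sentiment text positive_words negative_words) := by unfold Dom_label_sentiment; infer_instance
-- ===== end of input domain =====

-- ===== PORT A =====
-- B replaces A's two full scans of the token list with a token-frequency dictionary
-- plus one membership test per distinct word, weighted by its count (same result).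
def label_sentiment (text : String) (positive_words : List String) (negative_words : List String) : Int × String :=
  let tokens := PySem.Str.split₀ text
  let positive_count : Int := tokens.foldl (fun acc token => if positive_words.contains token then acc + 1 else acc) 0
  let negative_count : Int := tokens.foldl (fun acc token => if negative_words.contains token then acc + 1 else acc) 0
  let sentiment_score := positive_count - negative_count
  let sentiment := if sentiment_score > 0 then "Positive" else if sentiment_score < 0 then "Negative" else "Neutral"
  (sentiment_score, sentiment)

-- ===== PORT B =====
def label_sentiment_alt (text : String) (positive_words : List String) (negative_words : List String) : Int × String :=
  let counts : PySem.Dict String Int :=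
    (PySem.Str.split₀ text).foldl (fun d token => d.insert token (d.getD token 0 + 1)) PySem.Dict.empty
  let sentiment_score : Int := counts.items.foldl
    (fun acc wc =>
      let acc := if positive_words.contains wc.1 then acc + wc.2 else acc
      if negative_words.contains wc.1 then acc - wc.2 else acc) 0
  let sentiment := if sentiment_score > 0 then "Positive" else if sentiment_score < 0 then "Negative" else "Neutral"
  (sentiment_score, sentiment)

-- ===== PRECONDITION & SPEC =====
def Spec_label_sentiment (text : String) (positive_words : List String) (negative_words : List String) (out : Int × String) : Prop := out = label_sentiment_alt text positive_words negative_words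
instance (text : String) (positive_words : List String) (negative_words : List String) (out : Int × String) : Decidable (Spec_label_sentiment text positive_words negative_words out) := by unfold Spec_label_sentiment; infer_instance

-- ===== CLAIM (what is proved, stated in full; the proofs are below) =====
def Claim_equal_label_sentiment : Prop := ∀ (text : String) (positive_words : List String) (negative_words : List String), Dom_label_sentiment text positive_words negative_words → Spec_label_sentiment text positive_words negative_words (label_sentiment text positive_words negative_words)

-- ===== LEMMAS AND PROOFS =====

-- ===== VERDICT (by name: the statement is the Claim_ definition above) =====
lemma sum_ite_eq_of_nodup (l : List String) (x : String) (v : String → Int)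
    (hnd : l.Nodup) (hx : x ∈ l) :
    (l.map (fun k => if k = x then v k else 0)).sum = v x := by
  induction l with
  | nil => cases hx
  | cons h t ih =>
    simp only [List.map_cons, List.sum_cons, List.nodup_cons] at hnd ⊢
    rcases List.mem_cons.mp hx with rfl | hx
    · have : (t.map (fun k => if k = x then v k else 0)).sum = 0 := by
        apply List.sum_eq_zero
        intro y hy
        simp only [List.mem_map] at hy
        obtain ⟨k, hk, rfl⟩ := hy
        have : k ≠ x := fun h => hnd.1 (h ▸ hk)
        simp [this]
      simp [this]
    · have hne : h ≠ x := fun h' => hnd.1 (h' ▸ hx)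
      rw [if_neg hne, ih hnd.2 hx]
      ring

lemma sum_weighted_count (p : String → Bool) (xs l : List String)
    (hnd : l.Nodup) (hx : ∀ x ∈ xs, x ∈ l) :
    (l.map (fun k => if p k then (xs.count k : Int) else 0)).sum = (xs.countP p : Int) := by
  induction xs with
  | nil => simp
  | cons x xs ih =>
    have hx' : ∀ y ∈ xs, y ∈ l := fun y hy => hx y (List.mem_cons_of_mem _ hy)
    have hmem : x ∈ l := hx x List.mem_cons_self
    have hfun : ∀ k, (if p k then ((x :: xs).count k : Int) else 0)
        = (if p k then (xs.count k : Int) else 0) + (if k = x then (if p k then (1:Int) else 0) else 0) := by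
      intro k
      have hc : ((x :: xs).count k : Int) = (xs.count k : Int) + (if k = x then 1 else 0) := by
        by_cases he : k = x
        · simp [he]
        · simp [he, Ne.symm he]
      rw [hc]; split_ifs <;> ring
    calc (l.map (fun k => if p k then ((x :: xs).count k : Int) else 0)).sum
        = (l.map (fun k => (if p k then (xs.count k : Int) else 0)
            + (if k = x then (if p k then (1:Int) else 0) else 0))).sum := by
          congr 1; exact List.map_congr_left (fun k _ => hfun k)
      _ = (l.map (fun k => if p k then (xs.count k : Int) else 0)).sum
            + (l.map (fun k => if k = x then (if p k then (1:Int) else 0) else 0)).sum := by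
          rw [← List.sum_map_add]
      _ = (xs.countP p : Int) + (if p x then (1:Int) else 0) := by
          rw [ih hx', sum_ite_eq_of_nodup l x _ hnd hmem]
      _ = ((x :: xs).countP p : Int) := by
          by_cases hp : p x <;> simp [hp]

lemma sum_map_sub_int (f g : String → Int) (l : List String) :
    (l.map (fun x => f x - g x)).sum = (l.map f).sum - (l.map g).sum := by
  induction l with
  | nil => simp
  | cons h t ih => simp only [List.map_cons, List.sum_cons, ih]; ring

lemma foldl_items_shift (pos neg : List String) (items : List (String × Int)) (a : Int) :
    items.foldl (fun acc wc =>
      if neg.contains wc.1 then (if pos.contains wc.1 then acc + wc.2 else acc) - wc.2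
      else (if pos.contains wc.1 then acc + wc.2 else acc)) a
    = a + (items.map (fun wc =>
        (if pos.contains wc.1 then wc.2 else 0) - (if neg.contains wc.1 then wc.2 else 0))).sum := by
  induction items generalizing a with
  | nil => simp
  | cons h t ih =>
    simp only [List.foldl_cons, List.map_cons, List.sum_cons]
    rw [ih]
    split_ifs <;> ring

-- ===== VERDICT (by name: the statement is the Claim_ definition above) =====
theorem label_sentiment_spec : Claim_equal_label_sentiment := by
  intro text pos neg _
  unfold Spec_label_sentiment label_sentiment label_sentiment_alt
  dsimp only
  rw [PySem.Dict.foldl_insert_getD_add_one_eq_counter]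
  set toks := PySem.Str.split₀ text with htoks
  rw [foldl_items_shift, PySem.Dict.items_counter]
  have hsub : ((PySem.Set.ofList toks).map (fun k => (k, (toks.count k : Int)))).map
      (fun wc => (if pos.contains wc.1 then wc.2 else 0) - (if neg.contains wc.1 then wc.2 else 0))
      = (PySem.Set.ofList toks).map (fun k =>
          (if pos.contains k then (toks.count k : Int) else 0)
          - (if neg.contains k then (toks.count k : Int) else 0)) := by
    rw [List.map_map]; rfl
  rw [hsub]
  have hsum : ((PySem.Set.ofList toks).map (fun k =>
      (if pos.contains k then (toks.count k : Int) else 0)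
      - (if neg.contains k then (toks.count k : Int) else 0))).sum
      = (toks.countP (pos.contains ·) : Int) - (toks.countP (neg.contains ·) : Int) := by
    have hnd := PySem.Set.nodup_ofList toks
    have hx : ∀ x ∈ toks, x ∈ PySem.Set.ofList toks :=
      fun x hx => (PySem.Set.mem_ofList toks x).mpr hx
    calc _ = ((PySem.Set.ofList toks).map (fun k => if pos.contains k then (toks.count k : Int) else 0)).sum
            - ((PySem.Set.ofList toks).map (fun k => if neg.contains k then (toks.count k : Int) else 0)).sum := by
          rw [sum_map_sub_int]
      _ = _ := by rw [sum_weighted_count _ _ _ hnd hx, sum_weighted_count _ _ _ hnd hx]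
  rw [hsum, PySem.List.foldl_count_if, PySem.List.foldl_count_if]
  have h1 : List.countP pos.contains toks = List.countP (fun x => decide (x ∈ pos)) toks :=
    List.countP_congr (fun x _ => by by_cases h : x ∈ pos <;> simp [h])
  have h2 : List.countP neg.contains toks = List.countP (fun x => decide (x ∈ neg)) toks :=
    List.countP_congr (fun x _ => by by_cases h : x ∈ neg <;> simp [h])
  rw [h1, h2]
  simp
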